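-- pv_equiv track=rewrite | github.com/utk12/chatbot | interpret_wit_reply.py | getRelativeFeatures
-- ===== SOURCE A (Python) =====
-- def getRelativeFeatures(witReply):
-- 	features = []
-- 	if 'area' in witReply:
-- 		if 'level' in witReply:
-- 			levels = ['low', 'lower', 'high', 'greater', 'medium']
-- 			for level in witReply['level']:
-- 				if level in levels[:2]:
-- 					features.append('area_low')
-- 				elif level in levels[2:4]:
-- 					features.append('area_high')
-- 				elif level in levels[4:]:
-- 					features.append('area_medium')
-- 	return list(set(features))
-- ===== SOURCE B (Python) =====
-- def getRelativeFeatures(witReply):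
-- 	result = []
-- 	if 'area' in witReply and 'level' in witReply:
-- 		levels = witReply['level']
-- 		if any(level in ('low', 'lower') for level in levels):
-- 			result.append('area_low')
-- 		if any(level in ('high', 'greater') for level in levels):
-- 			result.append('area_high')
-- 		if any(level in ('medium',) for level in levels):
-- 			result.append('area_medium')
-- 	return result
-- ===== Notes on version B (the rewrite author's own statement) =====
-- stated objective: idiomatic
-- what changed: Replaces the classify-per-item loop plus final list(set(...)) dedup by three per-category any(...) existence scans that append each feature name at most once in a fixed order.
import Mathlib
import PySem

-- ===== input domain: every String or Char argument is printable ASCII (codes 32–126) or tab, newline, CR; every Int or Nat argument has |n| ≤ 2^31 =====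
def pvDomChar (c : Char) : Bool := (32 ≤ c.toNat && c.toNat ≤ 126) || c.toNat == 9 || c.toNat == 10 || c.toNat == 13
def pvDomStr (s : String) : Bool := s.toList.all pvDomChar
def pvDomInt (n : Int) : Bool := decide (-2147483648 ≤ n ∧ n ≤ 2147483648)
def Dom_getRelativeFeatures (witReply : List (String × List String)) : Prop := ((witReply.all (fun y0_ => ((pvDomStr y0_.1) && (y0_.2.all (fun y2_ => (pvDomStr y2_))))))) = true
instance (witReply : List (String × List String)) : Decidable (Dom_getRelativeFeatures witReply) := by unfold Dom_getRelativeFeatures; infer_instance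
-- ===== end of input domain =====

-- B replaces A's classify-per-item loop plus final list(set(...)) dedup by three per-category
-- existence scans appending each feature at most once in a fixed order; Pre_ excludes inputs
-- that trigger two or more categories, where A's list(set(...)) order is accidental hash order.


-- ===== PORT A =====
def getRelativeFeatures (witReply : List (String × List String)) : List String :=
  let features : List String := []
  if PySem.Dict.contains (PySem.Dict.ofList witReply) "area" then
    if PySem.Dict.contains (PySem.Dict.ofList witReply) "level" then
      let levels : List String := ["low", "lower", "high", "greater", "medium"]
      let features := (PySem.Dict.getD (PySem.Dict.ofList witReply) "level" []).foldl (fun features level =>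
        if (PySem.List.slice levels none (some 2)).contains level then
          features ++ ["area_low"]
        else if (PySem.List.slice levels (some 2) (some 4)).contains level then
          features ++ ["area_high"]
        else if (PySem.List.slice levels (some 4) none).contains level then
          features ++ ["area_medium"]
        else features) features
      PySem.Set.ofList features
    else PySem.Set.ofList features
  else PySem.Set.ofList features

-- ===== PORT B =====
def getRelativeFeatures_alt (witReply : List (String × List String)) : List String :=
  let result : List String := []
  if PySem.Dict.contains (PySem.Dict.ofList witReply) "area" && PySem.Dict.contains (PySem.Dict.ofList witReply) "level" then
    let levels := PySem.Dict.getD (PySem.Dict.ofList witReply) "level" []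
    let result := if levels.any (fun level => level == "low" || level == "lower") then
                    result ++ ["area_low"] else result
    let result := if levels.any (fun level => level == "high" || level == "greater") then
                    result ++ ["area_high"] else result
    let result := if levels.any (fun level => level == "medium") then
                    result ++ ["area_medium"] else result
    result
  else result

-- ===== PRECONDITION & SPEC =====
def pvLevels (witReply : List (String × List String)) : List String :=
  if PySem.Dict.contains (PySem.Dict.ofList witReply) "area" && PySem.Dict.contains (PySem.Dict.ofList witReply) "level" then
    PySem.Dict.getD (PySem.Dict.ofList witReply) "level" []
  else []

-- Pre_ excludes inputs whose 'level' values trigger two or more of the three feature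
-- categories: there A returns list(set(...)) in Python's randomized string-hash order,
-- which is accidental and unmatchable by any deterministic implementation.
def Pre_getRelativeFeatures (witReply : List (String × List String)) : Prop :=
  (((pvLevels witReply).any (fun l => l == "low" || l == "lower"))
     && ((pvLevels witReply).any (fun l => l == "high" || l == "greater"))) = false
  ∧ (((pvLevels witReply).any (fun l => l == "low" || l == "lower"))
     && ((pvLevels witReply).any (fun l => l == "medium"))) = false
  ∧ (((pvLevels witReply).any (fun l => l == "high" || l == "greater"))
     && ((pvLevels witReply).any (fun l => l == "medium"))) = false
instance (witReply : List (String × List String)) : Decidable (Pre_getRelativeFeatures witReply) := by unfold Pre_getRelativeFeatures; infer_instance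

def pvWitness_getRelativeFeatures : (List (String × List String)) :=
  [("area", []), ("level", ["low", "lower", "zzz"])]

def Spec_getRelativeFeatures (witReply : List (String × List String)) (out : List String) : Prop := out = getRelativeFeatures_alt witReply
instance (witReply : List (String × List String)) (out : List String) : Decidable (Spec_getRelativeFeatures witReply out) := by unfold Spec_getRelativeFeatures; infer_instance

-- ===== CLAIM (what is proved, stated in full; the proofs are below) =====
def Claim_equal_getRelativeFeatures : Prop := ∀ (witReply : List (String × List String)), Dom_getRelativeFeatures witReply → Pre_getRelativeFeatures witReply → Spec_getRelativeFeatures witReply (getRelativeFeatures witReply)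

-- ===== LEMMAS AND PROOFS =====

-- the per-level classifier A's loop appends
def pvF (l : String) : List String :=
  if l == "low" || l == "lower" then ["area_low"]
  else if l == "high" || l == "greater" then ["area_high"]
  else if l == "medium" then ["area_medium"]
  else []

theorem pvA_eq_ofList_flatMap (lvls : List String) :
    (lvls.foldl (fun features level =>
        if (PySem.List.slice ["low", "lower", "high", "greater", "medium"] none (some 2)).contains level then
          features ++ ["area_low"]
        else if (PySem.List.slice ["low", "lower", "high", "greater", "medium"] (some 2) (some 4)).contains level then
          features ++ ["area_high"]
        else if (PySem.List.slice ["low", "lower", "high", "greater", "medium"] (some 4) none).contains level then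
          features ++ ["area_medium"]
        else features) []) = lvls.flatMap pvF := by
  have h : ∀ (acc : List String), (lvls.foldl (fun features level =>
        if (PySem.List.slice ["low", "lower", "high", "greater", "medium"] none (some 2)).contains level then
          features ++ ["area_low"]
        else if (PySem.List.slice ["low", "lower", "high", "greater", "medium"] (some 2) (some 4)).contains level then
          features ++ ["area_high"]
        else if (PySem.List.slice ["low", "lower", "high", "greater", "medium"] (some 4) none).contains level then
          features ++ ["area_medium"]
        else features) acc) = acc ++ lvls.flatMap pvF := by
    induction lvls with
    | nil => simp
    | cons x xs ih =>
      intro acc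
      simp only [List.foldl_cons, List.flatMap_cons, ih, pvF]
      by_cases h1 : (x == "low" || x == "lower") = true
      · rcases Bool.or_eq_true_iff.mp h1 with h | h <;>
          simp_all [PySem.List.slice, PySem.List.clampIdx, beq_iff_eq]
      · by_cases h2 : (x == "high" || x == "greater") = true
        · rcases Bool.or_eq_true_iff.mp h2 with h | h <;>
            simp_all [PySem.List.slice, PySem.List.clampIdx, beq_iff_eq]
        · by_cases h3 : (x == "medium") = true
          · simp_all [PySem.List.slice, PySem.List.clampIdx, beq_iff_eq]
          · simp_all [PySem.List.slice, PySem.List.clampIdx, beq_iff_eq]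
  simpa using h []

theorem mem_flatMap_pvF (lvls : List String) (x : String) :
    x ∈ lvls.flatMap pvF ↔
      (x = "area_low" ∧ lvls.any (fun l => l == "low" || l == "lower"))
      ∨ (x = "area_high" ∧ lvls.any (fun l => l == "high" || l == "greater"))
      ∨ (x = "area_medium" ∧ lvls.any (fun l => l == "medium")) := by
  simp only [List.mem_flatMap, List.any_eq_true, pvF]
  constructor
  · rintro ⟨l, hl, hx⟩
    by_cases h1 : (l == "low" || l == "lower") = true
    · simp [h1] at hx; exact Or.inl ⟨hx, l, hl, h1⟩
    · by_cases h2 : (l == "high" || l == "greater") = true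
      · simp [h1, h2] at hx; exact Or.inr (Or.inl ⟨hx, l, hl, h2⟩)
      · by_cases h3 : (l == "medium") = true
        · simp [h1, h2, h3] at hx; exact Or.inr (Or.inr ⟨hx, l, hl, h3⟩)
        · simp [h1, h2, h3] at hx
  · rintro (⟨rfl, l, hl, h⟩ | ⟨rfl, l, hl, h⟩ | ⟨rfl, l, hl, h⟩)
    · exact ⟨l, hl, by simp [h]⟩
    · refine ⟨l, hl, ?_⟩
      have h1 : (l == "low" || l == "lower") = false := by
        rcases Bool.or_eq_true_iff.mp h with h' | h' <;> simp_all [beq_iff_eq]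
      simp [h1, h]
    · refine ⟨l, hl, ?_⟩
      have heq : l = "medium" := by simpa [beq_iff_eq] using h
      subst heq
      simp
  
theorem ofList_singleton_of_all_eq {xs : List String} {a : String}
    (hne : xs ≠ []) (hall : ∀ x ∈ xs, x = a) : PySem.Set.ofList xs = [a] := by
  have hnd : (PySem.Set.ofList xs).Nodup := PySem.Set.nodup_ofList xs
  have hmem : ∀ x, x ∈ PySem.Set.ofList xs ↔ x ∈ xs := fun x => PySem.Set.mem_ofList _ _
  have hallo : ∀ x ∈ PySem.Set.ofList xs, x = a := fun x hx => hall x ((hmem x).mp hx)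
  have hamem : a ∈ PySem.Set.ofList xs := by
    rcases xs with _ | ⟨y, ys⟩
    · exact absurd rfl hne
    · have hy : y ∈ PySem.Set.ofList (y :: ys) := (hmem y).mpr (by simp)
      have hya : y = a := hall y (by simp)
      exact (hmem a).mpr (by simp [← hya])
  rcases hs : PySem.Set.ofList xs with _ | ⟨b, bs⟩
  · rw [hs] at hamem; simp at hamem
  · rw [hs] at hallo hnd hamem
    have hb : b = a := hallo b (by simp)
    rcases bs with _ | ⟨c, cs⟩
    · simp [hb]
    · have hc : c = a := hallo c (by simp)
      exfalso
      simp at hnd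
      exact hnd.1.1 (hb.trans hc.symm)

theorem ofList_eq_nil_of_flatMap_none (lvls : List String)
    (h1 : lvls.any (fun l => l == "low" || l == "lower") = false)
    (h2 : lvls.any (fun l => l == "high" || l == "greater") = false)
    (h3 : lvls.any (fun l => l == "medium") = false) :
    PySem.Set.ofList (lvls.flatMap pvF) = [] := by
  have : lvls.flatMap pvF = [] := by
    apply List.eq_nil_iff_forall_not_mem.mpr
    intro x hx
    rcases (mem_flatMap_pvF lvls x).mp hx with ⟨_, h⟩ | ⟨_, h⟩ | ⟨_, h⟩ <;> simp_all
  simp [this, PySem.Set.ofList]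

theorem main_eq (witReply : List (String × List String))
    (hpre : Pre_getRelativeFeatures witReply) :
    getRelativeFeatures witReply = getRelativeFeatures_alt witReply := by
  unfold getRelativeFeatures getRelativeFeatures_alt
  by_cases ha : PySem.Dict.contains (PySem.Dict.ofList witReply) "area" = true
  · by_cases hl : PySem.Dict.contains (PySem.Dict.ofList witReply) "level" = true
    · simp only [ha, hl, if_true, Bool.and_self]
      unfold Pre_getRelativeFeatures pvLevels at hpre
      simp only [ha, hl, Bool.and_self, if_true] at hpre
      obtain ⟨h12, h13, h23⟩ := hpre
      set lvls := PySem.Dict.getD (PySem.Dict.ofList witReply) "level" [] with hlv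
      rw [pvA_eq_ofList_flatMap]
      by_cases b1 : lvls.any (fun l => l == "low" || l == "lower") = true
      · have b2 : lvls.any (fun l => l == "high" || l == "greater") = false := by
          rw [b1] at h12; simpa using h12
        have b3 : lvls.any (fun l => l == "medium") = false := by
          rw [b1] at h13; simpa using h13
        have hres : PySem.Set.ofList (lvls.flatMap pvF) = ["area_low"] := by
          apply ofList_singleton_of_all_eq
          · intro hnil
            have := (mem_flatMap_pvF lvls "area_low").mpr (Or.inl ⟨rfl, b1⟩)
            simp [hnil] at this
          · intro x hx
            rcases (mem_flatMap_pvF lvls x).mp hx with ⟨rfl, _⟩ | ⟨rfl, h⟩ | ⟨rfl, h⟩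
            · rfl
            · rw [b2] at h; simp at h
            · rw [b3] at h; simp at h
        simp [b1, b2, b3, hres]
      · by_cases b2 : lvls.any (fun l => l == "high" || l == "greater") = true
        · have b3 : lvls.any (fun l => l == "medium") = false := by
            rw [b2] at h23; simpa using h23
          have hres : PySem.Set.ofList (lvls.flatMap pvF) = ["area_high"] := by
            apply ofList_singleton_of_all_eq
            · intro hnil
              have := (mem_flatMap_pvF lvls "area_high").mpr (Or.inr (Or.inl ⟨rfl, b2⟩))
              simp [hnil] at this
            · intro x hx
              rcases (mem_flatMap_pvF lvls x).mp hx with ⟨rfl, h⟩ | ⟨rfl, _⟩ | ⟨rfl, h⟩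
              · rw [Bool.not_eq_true] at b1; rw [b1] at h; simp at h
              · rfl
              · rw [b3] at h; simp at h
          simp [b1, b2, b3, hres]
        · by_cases b3 : lvls.any (fun l => l == "medium") = true
          · have hres : PySem.Set.ofList (lvls.flatMap pvF) = ["area_medium"] := by
              apply ofList_singleton_of_all_eq
              · intro hnil
                have := (mem_flatMap_pvF lvls "area_medium").mpr (Or.inr (Or.inr ⟨rfl, b3⟩))
                simp [hnil] at this
              · intro x hx
                rcases (mem_flatMap_pvF lvls x).mp hx with ⟨rfl, h⟩ | ⟨rfl, h⟩ | ⟨rfl, _⟩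
                · rw [Bool.not_eq_true] at b1; rw [b1] at h; simp at h
                · rw [Bool.not_eq_true] at b2; rw [b2] at h; simp at h
                · rfl
            simp [b1, b2, b3, hres]
          · have hres : PySem.Set.ofList (lvls.flatMap pvF) = [] :=
              ofList_eq_nil_of_flatMap_none lvls (Bool.eq_false_iff.mpr b1)
                (Bool.eq_false_iff.mpr b2) (Bool.eq_false_iff.mpr b3)
            simp [b1, b2, b3, hres]
    · simp [ha, hl, PySem.Set.ofList]
  · simp [ha, PySem.Set.ofList]

-- ===== VERDICT (by name: the statement is the Claim_ definition above) =====
theorem getRelativeFeatures_spec : Claim_equal_getRelativeFeatures := by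
  intro witReply _ hpre
  unfold Spec_getRelativeFeatures
  exact main_eq witReply hpre
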